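-- pv_equiv track=rewrite | github.com/RANTOfandresena/sudoku | sudoku.py | casPossibleSurLeCase
-- ===== SOURCE A (Python) =====
-- def casPossibleGeneral(donne,i,j):
--   casLigne=[ii for ii in range(1,10) if ii not in donne[i]]
--   casColonne=[iii for iii in range(1,10) if iii not in [ii[j] for ii in donne]]
--   casPossible=[ii for ii in casLigne if ii in casColonne]
--   xx=(i//3)*3
--   yy=(j//3)*3
--   carre=[donne[m][n] for m in range(xx,xx+3) for n in range(yy,yy+3)]
--   carre=[ii for ii in range(1,10) if ii not in carre]
--   casPossible=[ii for ii in casPossible if (ii in carre)]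
--   return casPossible
--
-- def casPossibleSurLeCase(donne,x,y):
--   m=[casPossibleGeneral(donne,y,i) for i in range(0,len((donne[y])))]
--   isa=[len([1 for a in m[x+1:] if n in a]) for n in m[x]]
--   if len(isa)==0:
--     return []
--   minimum=min(isa)
--   casPossible=[i for i in m[x] if (len([1 for a in m[x+1:] if i in a])==minimum)]
--   return casPossible
-- ===== SOURCE B (Python) =====
-- def casPossibleGeneral(donne,i,j):
--   casLigne=[ii for ii in range(1,10) if ii not in donne[i]]
--   casColonne=[iii for iii in range(1,10) if iii not in [ii[j] for ii in donne]]
--   casPossible=[ii for ii in casLigne if ii in casColonne]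
--   xx=(i//3)*3
--   yy=(j//3)*3
--   carre=[donne[m][n] for m in range(xx,xx+3) for n in range(yy,yy+3)]
--   carre=[ii for ii in range(1,10) if ii not in carre]
--   casPossible=[ii for ii in casPossible if (ii in carre)]
--   return casPossible
--
-- def casPossibleSurLeCase(donne,x,y):
--   m=[casPossibleGeneral(donne,y,i) for i in range(len(donne[y]))]
--   cell=m[x]
--   if not cell:
--     return []
--   counts={}
--   for a in m[x+1:]:
--     for v in set(a):
--       counts[v]=counts.get(v,0)+1
--   minimum=min(counts.get(n,0) for n in cell)
--   return [i for i in cell if counts.get(i,0)==minimum]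
-- ===== Notes on version B (the rewrite author's own statement) =====
-- stated objective: alternative
-- what changed: A rescans the slice m[x+1:] once per candidate value (and again in the final filter); B builds a frequency dict over the slice in one pass (incrementing once per distinct value of each list) and answers every per-candidate count by a dict lookup.
import Mathlib
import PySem

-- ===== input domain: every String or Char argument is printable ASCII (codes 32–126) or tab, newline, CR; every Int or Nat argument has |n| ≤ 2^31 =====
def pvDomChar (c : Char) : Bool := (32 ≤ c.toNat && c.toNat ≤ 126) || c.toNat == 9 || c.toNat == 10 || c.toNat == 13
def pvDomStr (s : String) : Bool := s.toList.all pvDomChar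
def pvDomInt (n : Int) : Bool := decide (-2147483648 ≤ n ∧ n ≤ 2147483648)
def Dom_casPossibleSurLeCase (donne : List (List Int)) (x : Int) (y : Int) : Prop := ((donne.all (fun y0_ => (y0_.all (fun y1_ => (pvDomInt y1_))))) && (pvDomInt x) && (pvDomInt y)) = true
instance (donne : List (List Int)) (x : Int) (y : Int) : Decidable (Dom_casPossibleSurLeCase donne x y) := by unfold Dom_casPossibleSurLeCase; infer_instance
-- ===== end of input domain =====

-- B replaces A's repeated rescans of m[x+1:] per candidate by one counting dict built in a
-- single pass (objective: simpler/faster single-pass counting; equal return value on Pre_).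

-- ===== PORT A =====
-- shared helper: casPossibleGeneral, identical source text in Source A and Source B
def casPossibleGeneralPort (donne : List (List Int)) (i j : Int) : List Int :=
  let rowi := (PySem.List.pyGet? donne i).getD []
  let casLigne := (PySem.List.pyRange 1 10 1).filter (fun ii => !(rowi.contains ii))
  let col := donne.map (fun ii => (PySem.List.pyGet? ii j).getD 0)
  let casColonne := (PySem.List.pyRange 1 10 1).filter (fun ii => !(col.contains ii))
  let casPossible := casLigne.filter (fun ii => casColonne.contains ii)
  let xx := (PySem.Int.floordiv i 3) * 3
  let yy := (PySem.Int.floordiv j 3) * 3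
  let carre := (PySem.List.pyRange xx (xx + 3) 1).flatMap
    (fun m => (PySem.List.pyRange yy (yy + 3) 1).map
      (fun n => (PySem.List.pyGet? ((PySem.List.pyGet? donne m).getD []) n).getD 0))
  let carre2 := (PySem.List.pyRange 1 10 1).filter (fun ii => !(carre.contains ii))
  casPossible.filter (fun ii => carre2.contains ii)

def casPossibleSurLeCase (donne : List (List Int)) (x : Int) (y : Int) : List Int :=
  let m := (PySem.List.pyRange 0 (((PySem.List.pyGet? donne y).getD []).length : Int) 1).map
    (fun i => casPossibleGeneralPort donne y i)
  let mx := (PySem.List.pyGet? m x).getD []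
  let tail := PySem.List.slice m (some (x + 1)) none
  let isa := mx.map (fun n => (((tail.filter (fun a => a.contains n)).map (fun _ => (1 : Int))).length : Int))
  if isa.length = 0 then []
  else
    let minimum := (PySem.List.min? isa (fun v => v)).getD 0
    mx.filter (fun i =>
      (((tail.filter (fun a => a.contains i)).map (fun _ => (1 : Int))).length : Int) == minimum)

-- ===== PORT B =====
def casPossibleSurLeCase_alt (donne : List (List Int)) (x : Int) (y : Int) : List Int :=
  let row := (PySem.List.pyGet? donne y).getD []
  let m := (PySem.List.pyRange 0 (row.length : Int) 1).map (fun i => casPossibleGeneralPort donne y i)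
  let cell := (PySem.List.pyGet? m x).getD []
  if cell = [] then []
  else
    let counts := (PySem.List.slice m (some (x + 1)) none).foldl
      (fun d a => (PySem.Set.ofList a).foldl (fun d v => d.insert v (d.getD v 0 + 1)) d)
      (PySem.Dict.empty : PySem.Dict Int Int)
    let minimum := (PySem.List.min? (cell.map (fun n => counts.getD n 0)) (fun v => v)).getD 0
    cell.filter (fun i => counts.getD i 0 == minimum)

-- ===== PRECONDITION & SPEC =====
-- Pre_ excludes exactly the inputs where the Python raises (IndexError): y out of range for
-- donne, empty row y (then m[x] raises), x out of range for row y, a row shorter than row y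
-- (column scan raises), or a missing/too-short row of the 3x3 square block.
def Pre_casPossibleSurLeCase (donne : List (List Int)) (x : Int) (y : Int) : Prop :=
  PySem.Raise.InRange donne.length y ∧
  (0 : Int) < (((PySem.List.pyGet? donne y).getD []).length : Int) ∧
  -((((PySem.List.pyGet? donne y).getD []).length : Int)) ≤ x ∧
  x < (((PySem.List.pyGet? donne y).getD []).length : Int) ∧
  (∀ r ∈ donne, (((PySem.List.pyGet? donne y).getD []).length : Int) ≤ (r.length : Int)) ∧
  (∀ mi ∈ PySem.List.pyRange ((PySem.Int.floordiv y 3) * 3) ((PySem.Int.floordiv y 3) * 3 + 3) 1,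
    PySem.Raise.InRange donne.length mi ∧
    (PySem.Int.floordiv ((((PySem.List.pyGet? donne y).getD []).length : Int) - 1) 3) * 3 + 3 ≤
      ((((PySem.List.pyGet? donne mi).getD []).length : Int)))

instance (donne : List (List Int)) (x : Int) (y : Int) : Decidable (Pre_casPossibleSurLeCase donne x y) := by
  unfold Pre_casPossibleSurLeCase; infer_instance

def pvWitness_casPossibleSurLeCase : List (List Int) × Int × Int :=
  (List.replicate 9 (List.replicate 9 0), 0, 0)

def Spec_casPossibleSurLeCase (donne : List (List Int)) (x : Int) (y : Int) (out : List Int) : Prop := out = casPossibleSurLeCase_alt donne x y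
instance (donne : List (List Int)) (x : Int) (y : Int) (out : List Int) : Decidable (Spec_casPossibleSurLeCase donne x y out) := by unfold Spec_casPossibleSurLeCase; infer_instance

-- ===== CLAIM (what is proved, stated in full; the proofs are below) =====
def Claim_equal_casPossibleSurLeCase : Prop := ∀ (donne : List (List Int)) (x : Int) (y : Int), Dom_casPossibleSurLeCase donne x y → Pre_casPossibleSurLeCase donne x y → Spec_casPossibleSurLeCase donne x y (casPossibleSurLeCase donne x y)

-- ===== LEMMAS AND PROOFS =====

-- the inner counting pass over set(a): every lookup grows by count in the set
theorem pv_getD_inner (a : List Int) (d : PySem.Dict Int Int) (v : Int) :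
    ((PySem.Set.ofList a).foldl (fun d v => d.insert v (d.getD v 0 + 1)) d).getD v 0
      = d.getD v 0 + ((PySem.Set.ofList a).count v : Int) :=
  PySem.Dict.getD_foldl_insert_add_one (PySem.Set.ofList a) d v

theorem pv_count_ofList (a : List Int) (v : Int) :
    ((PySem.Set.ofList a).count v : Int) = if a.contains v then 1 else 0 := by
  by_cases h : v ∈ a
  · rw [List.count_eq_one_of_mem (PySem.Set.nodup_ofList a) ((PySem.Set.mem_ofList a v).mpr h)]
    simp [h]
  · rw [List.count_eq_zero.mpr (fun hc => h ((PySem.Set.mem_ofList a v).mp hc))]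
    simp [h]

-- the whole counting dict: counts.get(v, 0) is the number of lists of tail containing v
theorem pv_counts_getD (tail : List (List Int)) (d : PySem.Dict Int Int) (v : Int) :
    (tail.foldl (fun d a => (PySem.Set.ofList a).foldl (fun d v => d.insert v (d.getD v 0 + 1)) d) d).getD v 0
      = d.getD v 0 + (tail.countP (fun a => a.contains v) : Int) := by
  induction tail generalizing d with
  | nil => simp
  | cons a rest ih =>
      rw [List.foldl_cons, ih, pv_getD_inner, pv_count_ofList, List.countP_cons]
      by_cases h : a.contains v = true
      · simp only [h, if_true]; push_cast [h]; ring
      · simp only [h]; push_cast [h]; ring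

-- ===== VERDICT (by name: the statement is the Claim_ definition above) =====
theorem casPossibleSurLeCase_spec : Claim_equal_casPossibleSurLeCase := by
  intro donne x y _ _
  unfold Spec_casPossibleSurLeCase casPossibleSurLeCase casPossibleSurLeCase_alt
  simp only [pv_counts_getD, PySem.Dict.getD_empty, zero_add, List.length_map,
    ← List.countP_eq_length_filter]
  set m := (PySem.List.pyRange 0 (((PySem.List.pyGet? donne y).getD []).length : Int) 1).map
    (fun i => casPossibleGeneralPort donne y i) with hm
  set cell := (PySem.List.pyGet? m x).getD [] with hc
  by_cases h : cell = []
  · simp [h]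
  · have hlen : ¬ cell.length = 0 := by simpa [List.length_eq_zero_iff] using h
    simp [h, hlen]
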